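-- pv_equiv track=rewrite | github.com/paiml/depyler | examples/hard_pathological_string4.py | count_distinct_words
-- ===== SOURCE A (Python) =====
-- def count_distinct_words(text: str) -> int:
--     """Count distinct words (space-separated)."""
--     words: dict[str, int] = {}
--     current: str = ""
--     i: int = 0
--     while i < len(text):
--         c: str = text[i]
--         if c == " ":
--             if len(current) > 0:
--                 words[current] = 1
--                 current = ""
--         else:
--             current = current + c
--         i = i + 1
--     if len(current) > 0:
--         words[current] = 1
--     return len(words)
-- ===== SOURCE B (Python) =====
-- def count_distinct_words(text: str) -> int:
--     """Count distinct words (space-separated): sort the tokens, count changes."""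
--     tokens = sorted(t for t in text.split(' ') if t)
--     count = 0
--     prev = None
--     for t in tokens:
--         if t != prev:
--             count += 1
--             prev = t
--     return count
-- ===== Notes on version B (the rewrite author's own statement) =====
-- stated objective: faster
-- what changed: Replaces A's char-by-char scan that grows each word by string concatenation and dedups in a dict with split-on-space, sort, and a single adjacent-compare pass that counts token changes.
import Mathlib
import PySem

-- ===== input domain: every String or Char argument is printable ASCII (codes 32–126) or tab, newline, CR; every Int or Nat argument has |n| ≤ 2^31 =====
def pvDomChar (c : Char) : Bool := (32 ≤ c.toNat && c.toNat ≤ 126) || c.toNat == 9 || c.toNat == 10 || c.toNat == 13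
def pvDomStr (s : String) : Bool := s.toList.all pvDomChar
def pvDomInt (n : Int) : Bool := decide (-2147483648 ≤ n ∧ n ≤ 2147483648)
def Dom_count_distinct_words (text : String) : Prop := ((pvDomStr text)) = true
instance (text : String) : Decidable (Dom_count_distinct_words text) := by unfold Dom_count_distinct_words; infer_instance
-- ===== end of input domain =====

-- B replaces A's char-by-char scan into a dict by split-on-space, sort, and one
-- adjacent-compare pass that counts distinct tokens without any set or dict (objective: alternative).

-- ===== PORT A =====
-- A's dict is keyed by the word strings; per PySem convention string facts are proved on
-- List Char, so the port keys the dict by the word's character list (same keys, same count).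
def count_distinct_words (text : String) : Int :=
  let step : PySem.Dict (List Char) Int × List Char → Char → PySem.Dict (List Char) Int × List Char :=
    fun st c =>
      if c = ' ' then
        if st.2.length > 0 then (st.1.insert st.2 (1 : Int), ([] : List Char)) else st
      else (st.1, st.2 ++ [c])
  let st := text.toList.foldl step (PySem.Dict.empty, ([] : List Char))
  let words := if st.2.length > 0 then st.1.insert st.2 (1 : Int) else st.1
  (words.size : Int)

-- ===== PORT B =====
def count_distinct_words_alt (text : String) : Int :=
  let tokens := (PySem.Chars.splitOn text.toList [' ']).filter (fun t => !t.isEmpty)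
  let ts := PySem.List.sorted tokens (fun t => t) false
  (ts.foldl
    (fun (st : Int × Option (List Char)) t =>
      if some t ≠ st.2 then (st.1 + 1, some t) else st)
    ((0 : Int), (none : Option (List Char)))).1

-- ===== PRECONDITION & SPEC =====
def Spec_count_distinct_words (text : String) (out : Int) : Prop := out = count_distinct_words_alt text
instance (text : String) (out : Int) : Decidable (Spec_count_distinct_words text out) := by unfold Spec_count_distinct_words; infer_instance

-- ===== CLAIM (what is proved, stated in full; the proofs are below) =====
def Claim_equal_count_distinct_words : Prop := ∀ (text : String), Dom_count_distinct_words text → Spec_count_distinct_words text (count_distinct_words text)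

-- ===== LEMMAS AND PROOFS =====

-- Splitting on a single space, written as the simple structural recursion both proofs use.
def splitSp (cur : List Char) : List Char → List (List Char)
  | [] => [cur]
  | c :: rest => if c = ' ' then cur :: splitSp [] rest else splitSp (cur ++ [c]) rest

theorem go_eq (l : List Char) : ∀ (fuel : Nat) (cur : List Char) (acc : List (List Char)),
    l.length ≤ fuel →
    PySem.Chars.splitOn.go [' '] fuel l cur acc = acc.reverse ++ splitSp cur.reverse l := by
  induction l with
  | nil =>
    intro fuel cur acc _
    cases fuel <;> simp [PySem.Chars.splitOn.go, splitSp]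
  | cons c rest ih =>
    intro fuel cur acc h
    cases fuel with
    | zero => simp at h
    | succ f =>
      by_cases hc : c = ' '
      · subst hc
        have hp : List.isPrefixOf [' '] (' ' :: rest) = true := by simp [List.isPrefixOf]
        simp only [PySem.Chars.splitOn.go, hp, if_pos]
        have hd : List.drop [' '].length (' ' :: rest) = rest := rfl
        rw [hd, ih f [] (cur.reverse :: acc) (by simpa using h)]
        simp [splitSp]
      · have hp : List.isPrefixOf [' '] (c :: rest) = false := by
          simp [List.isPrefixOf]; exact fun h => absurd h.symm hc
        simp only [PySem.Chars.splitOn.go, hp]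
        rw [ih f (c :: cur) acc (by simpa using h)]
        simp [splitSp, hc]

theorem splitOn_eq (s : List Char) : PySem.Chars.splitOn s [' '] = splitSp [] s := by
  unfold PySem.Chars.splitOn
  rw [go_eq s (s.length + 1) [] [] (by omega)]
  simp

-- Dict.insert adds the key, as a set operation on the key list.
theorem keys_insert_add (d : PySem.Dict (List Char) Int) (k : List Char) (v : Int) :
    (d.insert k v).keys = PySem.Set.add d.keys k := by
  by_cases h : d.contains k = true
  · rw [PySem.Dict.keys_insert_of_contains d v h]
    have : PySem.Set.contains d.keys k = true := by
      simp [PySem.Set.contains]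
      exact (PySem.Dict.contains_iff_mem_keys d k).mp h
    simp [PySem.Set.add, PySem.Set.contains] at this ⊢
    simp [this]
  · rw [PySem.Dict.keys_insert_of_not_contains d v (by simpa using h)]
    have : ¬ k ∈ d.keys := fun hm => h ((PySem.Dict.contains_iff_mem_keys d k).mpr hm)
    simp [PySem.Set.add, PySem.Set.contains, this]

-- A's loop, flushed at the end, collects exactly the nonempty tokens of (cur ++ rest).
theorem loopA_keys (cs : List Char) :
    ∀ (d : PySem.Dict (List Char) Int) (cur : List Char),
    (let st := cs.foldl
        (fun st c =>
          if c = ' ' then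
            if st.2.length > 0 then (st.1.insert st.2 (1 : Int), ([] : List Char)) else st
          else (st.1, st.2 ++ [c]))
        (d, cur)
     (if st.2.length > 0 then st.1.insert st.2 (1 : Int) else st.1).keys)
    = PySem.Set.update d.keys ((splitSp cur cs).filter (fun t => !t.isEmpty)) := by
  induction cs with
  | nil =>
    intro d cur
    cases cur with
    | nil => simp [splitSp, PySem.Set.update]
    | cons a as =>
      simp only [List.foldl_nil, splitSp]
      rw [if_pos (by simp)]
      simp [keys_insert_add, PySem.Set.update]
  | cons c rest ih =>
    intro d cur
    by_cases hc : c = ' '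
    · subst hc
      cases cur with
      | nil => simpa [splitSp] using ih d []
      | cons a as =>
        simp only [List.foldl_cons, List.length_cons, gt_iff_lt,
          Nat.zero_lt_succ, ite_true]
        rw [ih (d.insert (a :: as) 1) []]
        simp [splitSp, keys_insert_add, PySem.Set.update]
    · simpa [splitSp, hc] using ih d (cur ++ [c])

theorem ofList_length (xs : List (List Char)) :
    (PySem.Set.ofList xs).length = xs.toFinset.card := by
  have h1 : (PySem.Set.ofList xs).toFinset.card = (PySem.Set.ofList xs).length :=
    List.toFinset_card_of_nodup (PySem.Set.nodup_ofList xs)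
  have h2 : (PySem.Set.ofList xs).toFinset = xs.toFinset := by
    ext y; simp [PySem.Set.mem_ofList]
  rw [← h1, h2]

-- A computes the number of distinct nonempty space-separated tokens.
theorem countA (text : String) :
    count_distinct_words text =
      (((splitSp [] text.toList).filter (fun t => !t.isEmpty)).toFinset.card : Int) := by
  unfold count_distinct_words
  have hk := loopA_keys text.toList PySem.Dict.empty []
  simp only at hk ⊢
  have hsize : ∀ (d : PySem.Dict (List Char) Int), d.size = d.keys.length := by
    intro d; simp [PySem.Dict.size, PySem.Dict.keys]
  rw [hsize, hk]
  have : (PySem.Dict.empty : PySem.Dict (List Char) Int).keys = [] := by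
    simp [PySem.Dict.keys_empty]
  rw [this]
  rw [show (PySem.Set.update ([] : PySem.Set (List Char))
        ((splitSp [] text.toList).filter (fun t => !t.isEmpty)))
      = PySem.Set.ofList ((splitSp [] text.toList).filter (fun t => !t.isEmpty)) from
    PySem.Set.update_empty _]
  rw [ofList_length]

-- B's adjacent-compare pass, as a structural recursion.
def countAdj : List (List Char) → Option (List Char) → Int
  | [], _ => 0
  | x :: xs, prev => (if some x ≠ prev then 1 else 0) + countAdj xs (some x)

theorem foldB_eq (l : List (List Char)) :
    ∀ (n : Int) (prev : Option (List Char)),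
    (l.foldl
      (fun (st : Int × Option (List Char)) t =>
        if some t ≠ st.2 then (st.1 + 1, some t) else st)
      (n, prev)).1 = n + countAdj l prev := by
  induction l with
  | nil => intro n prev; simp [countAdj]
  | cons x xs ih =>
    intro n prev
    by_cases h : some x = prev
    · subst h; simp only [List.foldl_cons, countAdj]
      rw [if_neg (by simp), if_neg (by simp)]
      simpa using ih n (some x)
    · simp only [List.foldl_cons, countAdj]
      rw [if_pos (by simpa using h), if_pos (by simpa using h)]
      rw [ih (n + 1) (some x)]; ring

theorem countAdj_some (l : List (List Char)) :
    ∀ (x : List Char), (x :: l).Pairwise (fun a b => a ≤ b) →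
    countAdj l (some x) = ((x :: l).toFinset.card : Int) - 1 := by
  induction l with
  | nil => intro x _; simp [countAdj]
  | cons y ys ih =>
    intro x hp
    have hxy : x ≤ y := (List.pairwise_cons.mp hp).1 y (by simp)
    have htail : (y :: ys).Pairwise (fun a b => a ≤ b) := (List.pairwise_cons.mp hp).2
    have hrec := ih y htail
    by_cases h : y = x
    · subst h
      have hset : (y :: y :: ys).toFinset = (y :: ys).toFinset := by simp
      simp only [countAdj, hrec, hset]
      simp
    · have hnot : x ∉ (y :: ys).toFinset := by
        simp only [List.mem_toFinset, List.mem_cons]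
        rintro (rfl | hx)
        · exact h rfl
        · have hyx : y ≤ x := (List.pairwise_cons.mp htail).1 x hx
          exact h (le_antisymm hyx hxy)
      have hcard : (x :: y :: ys).toFinset.card = (y :: ys).toFinset.card + 1 := by
        simp only [List.toFinset_cons] at hnot ⊢
        rw [Finset.card_insert_of_notMem hnot]
      simp only [countAdj, hrec, hcard]
      have hne : some y ≠ some x := by simpa using fun e : y = x => h e
      rw [if_pos hne]
      push_cast
      ring

theorem countAdj_none (l : List (List Char)) (hp : l.Pairwise (fun a b => a ≤ b)) :
    countAdj l none = (l.toFinset.card : Int) := by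
  cases l with
  | nil => simp [countAdj]
  | cons x xs =>
    have hrec := countAdj_some xs x hp
    simp only [countAdj, hrec]
    have hne : some x ≠ (none : Option (List Char)) := by simp
    rw [if_pos hne]
    have hpos : 0 < (x :: xs).toFinset.card := Finset.card_pos.mpr ⟨x, by simp⟩
    omega

theorem countB (text : String) :
    count_distinct_words_alt text =
      (((splitSp [] text.toList).filter (fun t => !t.isEmpty)).toFinset.card : Int) := by
  unfold count_distinct_words_alt
  simp only [splitOn_eq]
  set tokens := (splitSp [] text.toList).filter (fun t => !t.isEmpty) with htok
  rw [foldB_eq]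
  have hinst : (fun (a b : List Char) => a.decidableLT b)
      = (List.instLinearOrder : LinearOrder (List Char)).toDecidableLT := by
    funext a b; exact Subsingleton.elim _ _
  rw [hinst]
  rw [countAdj_none _ (by exact PySem.List.sorted_pairwise tokens (fun t => t))]
  rw [List.toFinset_eq_of_perm _ _ (by exact @PySem.List.sorted_perm (List Char) (List Char) List.instLT List.instLinearOrder.toDecidableLT tokens (fun t => t) false)]
  ring

-- ===== VERDICT (by name: the statement is the Claim_ definition above) =====
theorem count_distinct_words_spec : Claim_equal_count_distinct_words := by
  intro text _
  unfold Spec_count_distinct_words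
  rw [countA, countB]
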